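-- pv_equiv track=rewrite | github.com/bcoble/ProjectEuler | p36.py | isBinaryPalindrome
-- ===== SOURCE A (Python) =====
-- def isBinaryPalindrome(n):
--     b = bin(n)
--     binaryList = list(str(b))
--     newBL = binaryList[2:]
--     stringForm = "".join(newBL)
--     length = len(stringForm)
--     count = 1
--     for letter in stringForm:
--         i = length-count
--         if letter != stringForm[i]:
--             return False
--         count += 1
--     if n!=0:
--         return True
--     else:
--         return False
-- ===== SOURCE B (Python) =====
-- def isBinaryPalindrome(n):
--     if n <= 0:
--         return False
--     rev, m = 0, n
--     while m:
--         rev = rev * 2 + (m & 1)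
--         m >>= 1
--     return rev == n
-- ===== Notes on version B (the rewrite author's own statement) =====
-- stated objective: alternative
-- what changed: B replaces bin()/list/join string manipulation and the indexed character-comparison loop by pure integer bit arithmetic: it builds the bit-reversed integer with shifts and compares it to n, guarding non-positive inputs first.
import Mathlib
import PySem

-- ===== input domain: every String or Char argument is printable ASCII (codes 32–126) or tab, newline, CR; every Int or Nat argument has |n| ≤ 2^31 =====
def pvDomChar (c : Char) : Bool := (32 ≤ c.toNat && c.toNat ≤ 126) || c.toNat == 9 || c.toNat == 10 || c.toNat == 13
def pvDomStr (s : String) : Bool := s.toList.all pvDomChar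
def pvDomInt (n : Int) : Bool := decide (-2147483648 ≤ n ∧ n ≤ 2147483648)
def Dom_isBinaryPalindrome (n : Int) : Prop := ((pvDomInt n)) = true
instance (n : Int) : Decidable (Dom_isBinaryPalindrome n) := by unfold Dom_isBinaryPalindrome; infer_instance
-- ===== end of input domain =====

-- B replaces A's bin()/join string building and indexed character loop by integer
-- bit arithmetic (build the bit-reversed integer, compare with n); same return value.

-- ===== PORT A =====
-- A's 'for letter in stringForm: i = length-count; if letter != stringForm[i]: return False; count += 1'.
-- stringForm[i] is PySem.List.pyGet?; the none (IndexError) branch is unreachable here (1 ≤ count ≤ length).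
def pvPalLoop (s : List Char) : List Char → Int → Bool
  | [], _ => true
  | c :: rest, count =>
    match PySem.List.pyGet? s ((s.length : Int) - count) with
    | none => false
    | some x => if c ≠ x then false else pvPalLoop s rest (count + 1)

def isBinaryPalindrome (n : Int) : Bool :=
  -- b = bin(n); stringForm = "".join(list(str(b))[2:])
  let stringForm := PySem.List.slice (PySem.Int.toBinChars0b n) (some 2) none
  if pvPalLoop stringForm stringForm 1 then decide (n ≠ 0) else false

-- ===== PORT B =====
-- 'while m: rev = rev*2 + (m & 1); m >>= 1'  (m & 1 = m % 2, m >> 1 = m / 2 on naturals)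
def pvRevLoop : Nat → Nat → Nat
  | 0, acc => acc
  | m + 1, acc => pvRevLoop ((m + 1) / 2) (acc * 2 + (m + 1) % 2)
  decreasing_by omega

def isBinaryPalindrome_alt (n : Int) : Bool :=
  if n ≤ 0 then false else decide ((pvRevLoop n.toNat 0 : Int) = n)

-- ===== PRECONDITION & SPEC =====
def Spec_isBinaryPalindrome (n : Int) (out : Bool) : Prop := out = isBinaryPalindrome_alt n
instance (n : Int) (out : Bool) : Decidable (Spec_isBinaryPalindrome n out) := by unfold Spec_isBinaryPalindrome; infer_instance

-- ===== CLAIM (what is proved, stated in full; the proofs are below) =====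
def Claim_equal_isBinaryPalindrome : Prop := ∀ (n : Int), Dom_isBinaryPalindrome n → Spec_isBinaryPalindrome n (isBinaryPalindrome n)

-- ===== LEMMAS AND PROOFS =====

-- the char list Nat.toDigits 2 builds, in structural form
def bits2 (n : Nat) : List Char :=
  if n / 2 = 0 then [Nat.digitChar (n % 2)] else bits2 (n / 2) ++ [Nat.digitChar (n % 2)]
  decreasing_by omega

-- value of a binary char list, most significant first
def lval : List Char → Nat
  | [] => 0
  | c :: t => (if c = '1' then 1 else 0) * 2 ^ t.length + lval t

lemma toDigitsCore_eq_bits2 (f n : Nat) (ds : List Char) (h : n < f) :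
    Nat.toDigitsCore 2 f n ds = bits2 n ++ ds := by
  induction f generalizing n ds with
  | zero => omega
  | succ f ih =>
    rw [Nat.toDigitsCore, bits2]
    by_cases h2 : n / 2 = 0
    · simp [h2]
    · simp only [h2, if_false]
      rw [ih (n / 2) _ (by omega), List.append_assoc]
      rfl

lemma toDigits_eq_bits2 (n : Nat) : Nat.toDigits 2 n = bits2 n := by
  rw [Nat.toDigits, toDigitsCore_eq_bits2 (n + 1) n [] (by omega), List.append_nil]

lemma digitChar_mod_two (n : Nat) :
    Nat.digitChar (n % 2) = '0' ∨ Nat.digitChar (n % 2) = '1' := by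
  have : n % 2 = 0 ∨ n % 2 = 1 := by omega
  rcases this with h | h <;> rw [h] <;> simp [Nat.digitChar]

lemma bitv_digitChar_mod_two (n : Nat) :
    (if Nat.digitChar (n % 2) = '1' then 1 else 0) = n % 2 := by
  have : n % 2 = 0 ∨ n % 2 = 1 := by omega
  rcases this with h | h <;> rw [h] <;> simp [Nat.digitChar]

lemma bits2_allBits (n : Nat) : ∀ c ∈ bits2 n, c = '0' ∨ c = '1' := by
  induction n using bits2.induct with
  | case1 n h => rw [bits2, if_pos h]; simpa using digitChar_mod_two n
  | case2 n h ih =>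
    rw [bits2, if_neg h]
    intro c hc
    rcases List.mem_append.mp hc with hc | hc
    · exact ih c hc
    · simp at hc; subst hc; exact digitChar_mod_two n

lemma bits2_concat (n : Nat) : ∃ t, bits2 n = t ++ [Nat.digitChar (n % 2)] := by
  rw [bits2]; split
  · exact ⟨[], rfl⟩
  · exact ⟨_, rfl⟩

lemma lval_append_singleton (xs : List Char) (b : Char) :
    lval (xs ++ [b]) = 2 * lval xs + (if b = '1' then 1 else 0) := by
  induction xs with
  | nil => simp [lval]
  | cons c t ih =>
    simp only [List.cons_append, lval, ih, List.length_append, List.length_singleton]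
    ring

lemma lval_bits2 (n : Nat) : lval (bits2 n) = n := by
  induction n using bits2.induct with
  | case1 n h =>
    rw [bits2, if_pos h]
    have := bitv_digitChar_mod_two n
    simp only [lval, List.length_nil, pow_zero]
    omega
  | case2 n h ih =>
    rw [bits2, if_neg h, lval_append_singleton, ih, bitv_digitChar_mod_two]
    omega

lemma lval_lt (xs : List Char) : lval xs < 2 ^ xs.length := by
  induction xs with
  | nil => simp [lval]
  | cons c t ih =>
    simp only [lval, List.length_cons, pow_succ]
    have : (if c = '1' then 1 else 0) * 2 ^ t.length ≤ 2 ^ t.length := by split <;> simp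
    omega

lemma lval_inj (xs : List Char) : ∀ ys : List Char,
    (∀ c ∈ xs, c = '0' ∨ c = '1') → (∀ c ∈ ys, c = '0' ∨ c = '1') →
    xs.length = ys.length → lval xs = lval ys → xs = ys := by
  induction xs with
  | nil =>
    intro ys _ _ hl _
    cases ys with
    | nil => rfl
    | cons d u => simp at hl
  | cons c t ih =>
    intro ys hx hy hl hv
    cases ys with
    | nil => simp at hl
    | cons d u =>
      have hlen : t.length = u.length := by simpa using hl
      have h1 : lval t < 2 ^ u.length := hlen ▸ lval_lt t
      have h2 := lval_lt u
      simp only [lval, hlen] at hv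
      have hc : c = d := by
        rcases (hx c (by simp)) with h | h <;> rcases (hy d (by simp)) with h' | h' <;>
          simp [h, h'] at hv ⊢ <;> omega
      subst hc
      have : lval t = lval u := by
        by_cases h : c = '1' <;> simp [h] at hv <;> omega
      rw [ih u (fun e he => hx e (by simp [he])) (fun e he => hy e (by simp [he])) hlen this]

lemma revLoop_eq (m : Nat) : ∀ acc, 0 < m →
    pvRevLoop m acc = acc * 2 ^ (bits2 m).length + lval (bits2 m).reverse := by
  induction m using Nat.strong_induction_on with
  | _ m ih =>
    intro acc hm
    obtain ⟨k, rfl⟩ : ∃ k, m = k + 1 := ⟨m - 1, by omega⟩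
    rw [pvRevLoop, bits2]
    by_cases h2 : (k + 1) / 2 = 0
    · have hk : k = 0 := by omega
      subst hk
      simp [h2, pvRevLoop, lval, Nat.digitChar]
    · rw [if_neg h2, ih _ (by omega) _ (by omega)]
      obtain ⟨t, ht⟩ := bits2_concat ((k + 1) / 2)
      have : (bits2 ((k + 1) / 2) ++ [Nat.digitChar ((k + 1) % 2)]).reverse
          = Nat.digitChar ((k + 1) % 2) :: (bits2 ((k + 1) / 2)).reverse := by simp
      rw [this]
      simp only [lval, List.length_reverse, List.length_append, List.length_singleton,
        bitv_digitChar_mod_two, pow_succ]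
      have := Nat.div_add_mod (k + 1) 2
      ring_nf

lemma palLoop_iff (s : List Char) : ∀ (rest : List Char) (count : Int),
    (pvPalLoop s rest count = true ↔
      ∀ j : Nat, j < rest.length →
        PySem.List.pyGet? s ((s.length : Int) - (count + j)) = some (rest.getD j ' ')) := by
  intro rest
  induction rest with
  | nil => intro count; simp [pvPalLoop]
  | cons c r ih =>
    intro count
    rw [pvPalLoop]
    cases hg : PySem.List.pyGet? s ((s.length : Int) - count) with
    | none =>
      simp only [Bool.false_eq_true, false_iff]
      intro H
      have := H 0 (by simp)
      simp only [Nat.cast_zero, add_zero] at this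
      rw [hg] at this; simp at this
    | some x =>
      dsimp only
      by_cases hcx : c = x
      · subst hcx
        rw [if_neg (by simp)]
        rw [ih (count + 1)]
        constructor
        · intro H j hj
          cases j with
          | zero => simpa using hg
          | succ k =>
            have := H k (by simpa using hj)
            rw [show (s.length : Int) - (count + (k + 1 : Nat)) =
              (s.length : Int) - (count + 1 + k) by push_cast; ring]
            simpa using this
        · intro H k hk
          have := H (k + 1) (by simpa using hk)
          rw [show (s.length : Int) - (count + (k + 1 : Nat)) =
            (s.length : Int) - (count + 1 + k) by push_cast; ring] at this
          simpa using this
      · simp only [ne_eq, hcx, not_false_eq_true, if_true, Bool.false_eq_true, false_iff]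
        intro H
        have := H 0 (by simp)
        simp only [Nat.cast_zero, add_zero] at this
        rw [hg] at this
        exact hcx (Option.some_inj.mp this).symm

lemma pal_cond_iff (s : List Char) :
    (∀ j : Nat, j < s.length →
        PySem.List.pyGet? s ((s.length : Int) - (1 + j)) = some (s.getD j ' '))
      ↔ s.reverse = s := by
  constructor
  · intro H
    apply List.ext_getElem (by simp)
    intro i h1 h2
    have := H i h2
    rw [show (s.length : Int) - (1 + (i : Int)) = ((s.length - 1 - i : Nat) : Int) by omega,
      PySem.List.pyGet?_natCast, List.getElem?_eq_getElem (by omega),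
      List.getD_eq_getElem _ _ h2] at this
    rw [List.getElem_reverse]
    exact Option.some_inj.mp this
  · intro H j hj
    rw [show (s.length : Int) - (1 + (j : Int)) = ((s.length - 1 - j : Nat) : Int) by omega,
      PySem.List.pyGet?_natCast, List.getElem?_eq_getElem (by omega),
      List.getD_eq_getElem _ _ hj]
    have h2 : s.reverse[j]'(by simpa using hj) = s[j]'hj := by simp only [H]
    rw [List.getElem_reverse] at h2
    exact congrArg some h2

lemma isBinaryPalindrome_def (n : Int) :
    isBinaryPalindrome n =
      (if pvPalLoop (PySem.List.slice (PySem.Int.toBinChars0b n) (some 2) none)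
          (PySem.List.slice (PySem.Int.toBinChars0b n) (some 2) none) 1
        then decide (n ≠ 0) else false) := rfl

lemma stringForm_neg (n : Int) (hn : n < 0) :
    PySem.List.slice (PySem.Int.toBinChars0b n) (some 2) none
      = 'b' :: bits2 n.natAbs := by
  rw [PySem.Int.toBinChars0b, if_pos hn, PySem.List.slice_from _ (a := 2) (by omega), toDigits_eq_bits2]
  simp

lemma stringForm_nonneg (n : Int) (hn : ¬ n < 0) :
    PySem.List.slice (PySem.Int.toBinChars0b n) (some 2) none
      = bits2 n.toNat := by
  rw [PySem.Int.toBinChars0b, if_neg hn, PySem.List.slice_from _ (a := 2) (by omega), toDigits_eq_bits2]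
  simp

-- for positive n, A's palindrome loop succeeds iff B's reversed integer equals n
lemma key_pos (m : Nat) (hm : 0 < m) :
    (pvPalLoop (bits2 m) (bits2 m) 1 = true ↔ pvRevLoop m 0 = m) := by
  rw [palLoop_iff, pal_cond_iff, revLoop_eq m 0 hm]
  simp only [zero_mul, zero_add]
  constructor
  · intro h
    rw [h, lval_bits2]
  · intro h
    exact lval_inj ((bits2 m).reverse) (bits2 m)
      (fun c hc => bits2_allBits m c (List.mem_reverse.mp hc))
      (bits2_allBits m) (by simp) (by rw [h, lval_bits2])

-- ===== VERDICT (by name: the statement is the Claim_ definition above) =====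
theorem isBinaryPalindrome_spec : Claim_equal_isBinaryPalindrome := by
  intro n _
  unfold Spec_isBinaryPalindrome
  rcases lt_trichotomy n 0 with hn | hn | hn
  · -- n < 0: stringForm = 'b' :: digits; 'b' never equals the final binary digit
    rw [isBinaryPalindrome_def, stringForm_neg n hn]
    rw [isBinaryPalindrome_alt, if_pos (by omega : n ≤ 0)]
    have hm : 0 < n.natAbs := by omega
    obtain ⟨t, ht⟩ := bits2_concat n.natAbs
    cases hp : pvPalLoop ('b' :: bits2 n.natAbs) ('b' :: bits2 n.natAbs) 1 with
    | false => simp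
    | true =>
      exfalso
      have H := (palLoop_iff ('b' :: bits2 n.natAbs) ('b' :: bits2 n.natAbs) 1).mp hp
        0 (by simp)
      rw [ht] at H
      have hlen : (('b' :: (t ++ [Nat.digitChar (n.natAbs % 2)])).length : Int) - (1 + ((0 : Nat) : Int))
          = (('b' :: t).length : Int) := by simp
      rw [hlen, PySem.List.pyGet?_natCast] at H
      have : ('b' :: (t ++ [Nat.digitChar (n.natAbs % 2)]))[('b' :: t).length]? = some (Nat.digitChar (n.natAbs % 2)) := by
        rw [← PySem.List.pyGet?_natCast, show ('b' :: (t ++ [Nat.digitChar (n.natAbs % 2)])) = ('b' :: t) ++ [Nat.digitChar (n.natAbs % 2)] by simp,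
          PySem.List.pyGet?_append_length]
      rw [this] at H
      have := Option.some_inj.mp H
      rcases digitChar_mod_two n.natAbs with h | h <;> simp [h] at this
  · subst hn; decide
  · -- n > 0
    rw [isBinaryPalindrome_def, stringForm_nonneg n (by omega)]
    rw [isBinaryPalindrome_alt, if_neg (by omega : ¬ n ≤ 0)]
    have hm : 0 < n.toNat := by omega
    have hnm : (n.toNat : Int) = n := by omega
    rw [show (decide (n ≠ 0)) = true by rw [decide_eq_true_eq]; omega]
    cases hp : pvPalLoop (bits2 n.toNat) (bits2 n.toNat) 1 with
    | false =>
      simp only [Bool.false_eq_true, if_false]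
      symm
      rw [decide_eq_false_iff_not]
      intro hc
      have : pvRevLoop n.toNat 0 = n.toNat := by omega
      rw [(key_pos n.toNat hm).mpr this] at hp
      exact Bool.noConfusion hp
    | true =>
      simp only [if_true]
      symm
      rw [decide_eq_true_eq]
      have := (key_pos n.toNat hm).mp hp
      omega
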